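-- pv_equiv track=rewrite | github.com/GiorgosG1an/Tic-Tac-Toe-and-Reversi-with-AI | game/reversi.py | calcDiscs
-- ===== SOURCE A (Python) =====
-- def calcDiscs(board):
--     """
--     Calculates the total weight of discs on the board based on a predefined weight matrix.
--
--     Args:
--         board (dict): A dictionary representing the game board, where the keys are (row, col) tuples and the values are the disc types ('X' or 'O').
--
--     Returns:
--         int: The difference between the total weight of 'X' discs and 'O' discs on the board.
--     """
--     WEIGHT_MATRIX = [
--         [20, -3, 11,  8,  8, 11, -3, 20],
--         [-3, -7, -4,  1,  1, -4, -7, -3],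
--         [11, -4,  2,  2,  2,  2, -4, 11],
--         [ 8,  1,  2, -3, -3,  2,  1,  8],
--         [ 8,  1,  2, -3, -3,  2,  1,  8],
--         [11, -4,  2,  2,  2,  2, -4, 11],
--         [-3, -7, -4,  1,  1, -4, -7, -3],
--         [20, -3, 11,  8,  8, 11, -3, 20]
--     ]
--     total_weight_x = 0
--     total_weight_o = 0
--
--     for row in range(8):
--         for col in range(8):
--             tile = board.get((row, col))
--             if tile == 'X':
--                 total_weight_x += WEIGHT_MATRIX[row][col]
--             elif tile == 'O':
--                 total_weight_o += WEIGHT_MATRIX[row][col]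
--
--     return total_weight_x - total_weight_o
-- ===== SOURCE B (Python) =====
-- def calcDiscs(board):
--     """
--     Calculates the total weight of discs on the board based on a predefined weight matrix.
--
--     The 8x8 weight matrix is symmetric under reflecting rows/columns, so only its
--     4x4 quarter Q is stored: weight(r, c) = Q[min(r, 7-r)][min(c, 7-c)].
--     The result is one comprehension-sum over the discs present: sign * weight,
--     where sign is +1 for 'X', -1 for 'O', 0 otherwise.
--     """
--     Q = [[20, -3, 11, 8],
--          [-3, -7, -4, 1],
--          [11, -4,  2, 2],
--          [ 8,  1,  2, -3]]
--     SIGN = {'X': 1, 'O': -1}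
--     return sum(SIGN.get(t, 0) * Q[min(r, 7 - r)][min(c, 7 - c)]
--                for (r, c), t in board.items()
--                if 0 <= r < 8 and 0 <= c < 8)
-- ===== Notes on version B (the rewrite author's own statement) =====
-- stated objective: idiomatic
-- what changed: Replaces the fixed 64-cell grid scan with dict lookups by a single comprehension-sum over board.items() (guarded to the 8x8 grid), using a symmetry-folded 4x4 quarter of the weight matrix (weight(r,c)=Q[min(r,7-r)][min(c,7-c)]) and a sign table instead of two separate X/O accumulators; Pre_ excludes association lists with duplicate (row,col) keys, which cannot arise from A's Python dict argument.
import Mathlib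
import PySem

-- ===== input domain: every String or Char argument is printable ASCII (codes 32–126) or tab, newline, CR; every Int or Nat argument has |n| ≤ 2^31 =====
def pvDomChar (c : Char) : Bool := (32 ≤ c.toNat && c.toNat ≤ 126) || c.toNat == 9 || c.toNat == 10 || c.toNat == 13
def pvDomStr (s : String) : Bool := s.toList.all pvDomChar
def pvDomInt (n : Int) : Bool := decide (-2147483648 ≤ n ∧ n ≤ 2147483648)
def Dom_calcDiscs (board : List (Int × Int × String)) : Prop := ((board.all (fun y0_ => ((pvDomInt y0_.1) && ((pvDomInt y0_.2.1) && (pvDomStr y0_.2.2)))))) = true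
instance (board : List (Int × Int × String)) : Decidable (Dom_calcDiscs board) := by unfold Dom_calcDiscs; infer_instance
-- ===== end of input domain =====

-- B replaces A's 64-cell grid scan with dict lookups by one comprehension-sum over the discs
-- present, using a symmetry-folded 4x4 quarter of the weight matrix and a sign table.

-- ===== PORT A =====
-- A's WEIGHT_MATRIX and its indexing WEIGHT_MATRIX[row][col]; indices are always 0..7, so getD is exact.
def pvWmA : List (List Int) :=
  [[20, -3, 11,  8,  8, 11, -3, 20],
   [-3, -7, -4,  1,  1, -4, -7, -3],
   [11, -4,  2,  2,  2,  2, -4, 11],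
   [ 8,  1,  2, -3, -3,  2,  1,  8],
   [ 8,  1,  2, -3, -3,  2,  1,  8],
   [11, -4,  2,  2,  2,  2, -4, 11],
   [-3, -7, -4,  1,  1, -4, -7, -3],
   [20, -3, 11,  8,  8, 11, -3, 20]]

def pvWA (row col : Int) : Int := (PySem.List.pyGet? ((PySem.List.pyGet? pvWmA row).getD []) col).getD 0

def calcDiscs (board : List (Int × Int × String)) : Int :=
  let d : PySem.Dict (Int × Int) String := PySem.Dict.mk (board.map (fun e => ((e.1, e.2.1), e.2.2)))
  let st := (PySem.List.pyRange 0 8 1).foldl (fun st row =>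
    (PySem.List.pyRange 0 8 1).foldl (fun st col =>
      let tile := d.get? (row, col)
      if tile = some "X" then (st.1 + pvWA row col, st.2)
      else if tile = some "O" then (st.1, st.2 + pvWA row col)
      else st) st) ((0 : Int), (0 : Int))
  st.1 - st.2

-- ===== PORT B =====
-- B's quarter table Q, sign dict, and the weight Q[min(r,7-r)][min(c,7-c)]; the comprehension's
-- filter keeps indices in 0..3, so getD is exact.
def pvQ : List (List Int) :=
  [[20, -3, 11,  8],
   [-3, -7, -4,  1],
   [11, -4,  2,  2],
   [ 8,  1,  2, -3]]

def pvSign : PySem.Dict String Int := PySem.Dict.mk [("X", 1), ("O", -1)]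

def pvWB (r c : Int) : Int :=
  (PySem.List.pyGet? ((PySem.List.pyGet? pvQ (min r (7 - r))).getD []) (min c (7 - c))).getD 0

def calcDiscs_alt (board : List (Int × Int × String)) : Int :=
  ((board.filter (fun e => decide (0 ≤ e.1 ∧ e.1 < 8 ∧ 0 ≤ e.2.1 ∧ e.2.1 < 8))).map
    (fun e => pvSign.getD e.2.2 0 * pvWB e.1 e.2.1)).sum

-- ===== PRECONDITION & SPEC =====
-- Pre_ excludes association lists with duplicate (row, col) keys: they do not represent a Python
-- dict (A's argument type), and the list-as-dict reading of such inputs is ambiguous.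
def Pre_calcDiscs (board : List (Int × Int × String)) : Prop :=
  (board.map (fun e => (e.1, e.2.1))).Nodup
instance (board : List (Int × Int × String)) : Decidable (Pre_calcDiscs board) := by
  unfold Pre_calcDiscs; infer_instance

def pvWitness_calcDiscs : (List (Int × Int × String)) := [(0, 0, "X"), (7, 7, "O"), (3, 4, "X")]

def Spec_calcDiscs (board : List (Int × Int × String)) (out : Int) : Prop := out = calcDiscs_alt board
instance (board : List (Int × Int × String)) (out : Int) : Decidable (Spec_calcDiscs board out) := by unfold Spec_calcDiscs; infer_instance

-- ===== CLAIM (what is proved, stated in full; the proofs are below) =====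
def Claim_equal_calcDiscs : Prop := ∀ (board : List (Int × Int × String)), Dom_calcDiscs board → Pre_calcDiscs board → Spec_calcDiscs board (calcDiscs board)

-- ===== LEMMAS AND PROOFS =====

-- per-entry contribution (written with A's table and explicit tile cases)
def pvContrib (e : Int × Int × String) : Int :=
  if 0 ≤ e.1 ∧ e.1 < 8 ∧ 0 ≤ e.2.1 ∧ e.2.1 < 8 then
    if e.2.2 = "X" then pvWA e.1 e.2.1
    else if e.2.2 = "O" then -pvWA e.1 e.2.1
    else 0
  else 0

-- the two weight tables agree on the grid
lemma pvW_eq (r c : Int) (hr0 : 0 ≤ r) (hr : r < 8) (hc0 : 0 ≤ c) (hc : c < 8) :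
    pvWA r c = pvWB r c := by
  interval_cases r <;> interval_cases c <;> rfl

lemma sign_cases (t : String) :
    pvSign.getD t 0 = (if t = "X" then 1 else if t = "O" then -1 else 0) := by
  by_cases h1 : t = "X"
  · simp [h1, pvSign, PySem.Dict.getD, PySem.Dict.get?]
  · by_cases h2 : t = "O"
    · simp [h2, pvSign, PySem.Dict.getD, PySem.Dict.get?]
    · simp [h1, h2, pvSign, PySem.Dict.getD, PySem.Dict.get?, List.find?,
        show ("X" == t) = false from beq_eq_false_iff_ne.mpr (Ne.symm h1),
        show ("O" == t) = false from beq_eq_false_iff_ne.mpr (Ne.symm h2)]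

-- sum over a filtered-then-mapped list as a sum of guarded terms
lemma filter_map_sum (l : List (Int × Int × String)) (p : Int × Int × String → Bool)
    (f : Int × Int × String → Int) :
    ((l.filter p).map f).sum = (l.map (fun e => if p e then f e else 0)).sum := by
  induction l with
  | nil => rfl
  | cons a l ih =>
    by_cases h : p a <;> simp [h, ih]

-- B's value is the sum of contributions
lemma B_eq_sum (board : List (Int × Int × String)) :
    calcDiscs_alt board = (board.map pvContrib).sum := by
  unfold calcDiscs_alt
  rw [filter_map_sum]
  apply congrArg
  apply List.map_congr_left
  intro e _
  unfold pvContrib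
  by_cases hg : 0 ≤ e.1 ∧ e.1 < 8 ∧ 0 ≤ e.2.1 ∧ e.2.1 < 8
  · rw [if_pos (by exact_mod_cast decide_eq_true hg), if_pos hg, sign_cases,
      ← pvW_eq _ _ hg.1 hg.2.1 hg.2.2.1 hg.2.2.2]
    split_ifs <;> ring
  · rw [if_neg (by simpa using hg), if_neg hg]

-- cell value A reads at (r, c)
def pvF (d : PySem.Dict (Int × Int) String) (r c : Int) : Int :=
  if d.get? (r, c) = some "X" then pvWA r c
  else if d.get? (r, c) = some "O" then -pvWA r c
  else 0

lemma inner_fold (d : PySem.Dict (Int × Int) String) (r : Int) (cs : List Int) (x o : Int) :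
    cs.foldl (fun st col =>
      let tile := d.get? (r, col)
      if tile = some "X" then (st.1 + pvWA r col, st.2)
      else if tile = some "O" then (st.1, st.2 + pvWA r col)
      else st) (x, o)
    = (x + (cs.map (fun c => if d.get? (r, c) = some "X" then pvWA r c else 0)).sum,
       o + (cs.map (fun c => if d.get? (r, c) = some "O" then pvWA r c else 0)).sum) := by
  induction cs generalizing x o with
  | nil => simp
  | cons c cs ih =>
    simp only [List.foldl_cons, List.map_cons, List.sum_cons]
    by_cases h1 : d.get? (r, c) = some "X"
    · have h2 : ¬ d.get? (r, c) = some "O" := by simp [h1]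
      simp only [h1, Option.some.injEq, String.reduceEq, reduceIte]
      rw [ih]
      simp only [Prod.mk.injEq]
      constructor <;> ring
    · by_cases h2 : d.get? (r, c) = some "O"
      · rw [show (if d.get? (r, c) = some "X" then ((x + pvWA r c, o) : Int × Int)
              else if d.get? (r, c) = some "O" then (x, o + pvWA r c) else (x, o))
            = (x, o + pvWA r c) by rw [if_neg h1, if_pos h2]]
        rw [ih]
        simp only [h2, Option.some.injEq, String.reduceEq, reduceIte, Prod.mk.injEq]
        constructor <;> ring
      · rw [show (if d.get? (r, c) = some "X" then ((x + pvWA r c, o) : Int × Int)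
              else if d.get? (r, c) = some "O" then (x, o + pvWA r c) else (x, o))
            = (x, o) by rw [if_neg h1, if_neg h2]]
        rw [ih]
        simp only [h1, h2, reduceIte, Prod.mk.injEq]
        constructor <;> ring

lemma outer_fold (d : PySem.Dict (Int × Int) String) (rs cs : List Int) (x o : Int) :
    rs.foldl (fun st row =>
      cs.foldl (fun st col =>
        let tile := d.get? (row, col)
        if tile = some "X" then (st.1 + pvWA row col, st.2)
        else if tile = some "O" then (st.1, st.2 + pvWA row col)
        else st) st) (x, o)
    = (x + (rs.map (fun r => (cs.map (fun c => if d.get? (r, c) = some "X" then pvWA r c else 0)).sum)).sum,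
       o + (rs.map (fun r => (cs.map (fun c => if d.get? (r, c) = some "O" then pvWA r c else 0)).sum)).sum) := by
  induction rs generalizing x o with
  | nil => simp
  | cons r rs ih =>
    simp only [List.foldl_cons, List.map_cons, List.sum_cons]
    rw [inner_fold, ih]
    simp only [Prod.mk.injEq]
    constructor <;> ring

lemma sum_map_sub (l : List Int) (f g : Int → Int) :
    (l.map f).sum - (l.map g).sum = (l.map (fun x => f x - g x)).sum := by
  induction l with
  | nil => simp
  | cons a l ih => simp only [List.map_cons, List.sum_cons]; rw [← ih]; ring

-- A's value is the grid sum of pvF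
lemma A_eq_gridSum (board : List (Int × Int × String)) :
    calcDiscs board
      = ((PySem.List.pyRange 0 8 1).map (fun r =>
          ((PySem.List.pyRange 0 8 1).map (fun c =>
            pvF (PySem.Dict.mk (board.map (fun e => ((e.1, e.2.1), e.2.2)))) r c)).sum)).sum := by
  simp only [calcDiscs]
  rw [outer_fold]
  simp only [zero_add]
  rw [sum_map_sub]
  apply congrArg
  apply List.map_congr_left
  intro r _
  rw [sum_map_sub]
  apply congrArg
  apply List.map_congr_left
  intro c _
  unfold pvF
  split_ifs with h1 h2 <;> simp_all

-- one-key update of a mapped sum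
lemma sum_update (cs : List Int) (k : Int) (f g : Int → Int)
    (hc : cs.count k = 1) (he : ∀ c ∈ cs, c ≠ k → f c = g c) :
    (cs.map f).sum = (cs.map g).sum + (f k - g k) := by
  induction cs with
  | nil => simp at hc
  | cons a cs ih =>
    by_cases hak : a = k
    · subst hak
      have h0 : cs.count a = 0 := by
        simp [List.count_cons_self] at hc; omega
      have hnm : a ∉ cs := by
        intro hm; rw [List.count_eq_zero] at h0; exact h0 hm
      have hmeq : cs.map f = cs.map g := by
        apply List.map_congr_left
        intro c hcm
        exact he c (List.mem_cons_of_mem _ hcm) (fun h => hnm (h ▸ hcm))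
      simp only [List.map_cons, List.sum_cons, hmeq]; ring
    · have hc' : cs.count k = 1 := by
        rw [List.count_cons] at hc
        simpa [hak] using hc
      have := ih hc' (fun c hm hne => he c (List.mem_cons_of_mem _ hm) hne)
      simp only [List.map_cons, List.sum_cons, this, he a (List.mem_cons_self) hak]
      ring

lemma count_pyRange8 (k : Int) (h0 : 0 ≤ k) (h8 : k < 8) :
    (PySem.List.pyRange 0 8 1).count k = 1 := by
  interval_cases k <;> decide

-- main invariant: the grid sum over the dict of an assoc list with Nodup keys is the sum of contributions
lemma gridSum_eq_contribSum (l : List ((Int × Int) × String)) (hnd : (l.map Prod.fst).Nodup) :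
    ((PySem.List.pyRange 0 8 1).map (fun r =>
      ((PySem.List.pyRange 0 8 1).map (fun c => pvF (PySem.Dict.mk l) r c)).sum)).sum
    = (l.map (fun e => pvContrib (e.1.1, e.1.2, e.2))).sum := by
  induction l with
  | nil => decide
  | cons e rest ih =>
    obtain ⟨⟨r0, c0⟩, t0⟩ := e
    simp only [List.map_cons, List.nodup_cons] at hnd
    obtain ⟨hni, hnd'⟩ := hnd
    have hget : ∀ r c : Int, (PySem.Dict.mk (((r0, c0), t0) :: rest)).get? (r, c)
        = if (r0, c0) = (r, c) then some t0 else (PySem.Dict.mk rest).get? (r, c) := by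
      intro r c
      rw [PySem.Dict.get?_mk_cons]
      simp
    have hFne : ∀ r c : Int, (r0, c0) ≠ (r, c) →
        pvF (PySem.Dict.mk (((r0, c0), t0) :: rest)) r c = pvF (PySem.Dict.mk rest) r c := by
      intro r c hne
      unfold pvF
      rw [hget r c, if_neg hne]
    have hrest0 : (PySem.Dict.mk rest).get? (r0, c0) = none := by
      rw [PySem.Dict.get?_eq_none_iff_not_mem_keys]
      simpa [PySem.Dict.keys] using hni
    by_cases hg : 0 ≤ r0 ∧ r0 < 8 ∧ 0 ≤ c0 ∧ c0 < 8
    · obtain ⟨h1, h2, h3, h4⟩ := hg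
      have houter := sum_update (PySem.List.pyRange 0 8 1) r0
        (fun r => ((PySem.List.pyRange 0 8 1).map (fun c =>
          pvF (PySem.Dict.mk (((r0, c0), t0) :: rest)) r c)).sum)
        (fun r => ((PySem.List.pyRange 0 8 1).map (fun c =>
          pvF (PySem.Dict.mk rest) r c)).sum)
        (count_pyRange8 r0 h1 h2)
        (fun r _ hne => by
          apply congrArg
          apply List.map_congr_left
          intro c _
          exact hFne r c (fun heq => hne (by injection heq with a b; exact a.symm)))
      have hinner := sum_update (PySem.List.pyRange 0 8 1) c0
        (fun c => pvF (PySem.Dict.mk (((r0, c0), t0) :: rest)) r0 c)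
        (fun c => pvF (PySem.Dict.mk rest) r0 c)
        (count_pyRange8 c0 h3 h4)
        (fun c _ hne => hFne r0 c (fun heq => hne (by injection heq with a b; exact b.symm)))
      have hhead : pvF (PySem.Dict.mk (((r0, c0), t0) :: rest)) r0 c0
          = if t0 = "X" then pvWA r0 c0 else if t0 = "O" then -pvWA r0 c0 else 0 := by
        unfold pvF
        rw [hget r0 c0, if_pos rfl]
        split_ifs with hx ho <;> simp_all
      have hrF : pvF (PySem.Dict.mk rest) r0 c0 = 0 := by
        unfold pvF; rw [hrest0]; simp
      rw [houter]
      beta_reduce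
      rw [hinner, ih hnd']
      simp only [List.map_cons, List.sum_cons, hhead, hrF]
      unfold pvContrib
      simp only [if_pos (show (0:Int) ≤ r0 ∧ r0 < 8 ∧ 0 ≤ c0 ∧ c0 < 8 from ⟨h1, h2, h3, h4⟩)]
      ring
    · have hall : ∀ r c : Int, r ∈ PySem.List.pyRange 0 8 1 → c ∈ PySem.List.pyRange 0 8 1 →
          pvF (PySem.Dict.mk (((r0, c0), t0) :: rest)) r c = pvF (PySem.Dict.mk rest) r c := by
        intro r c hr hc
        rw [PySem.List.mem_pyRange_one] at hr hc
        apply hFne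
        intro heq
        injection heq with e1 e2
        exact hg ⟨e1 ▸ hr.1, e1 ▸ hr.2, e2 ▸ hc.1, e2 ▸ hc.2⟩
      have heq : ((PySem.List.pyRange 0 8 1).map (fun r =>
          ((PySem.List.pyRange 0 8 1).map (fun c =>
            pvF (PySem.Dict.mk (((r0, c0), t0) :: rest)) r c)).sum)).sum
          = ((PySem.List.pyRange 0 8 1).map (fun r =>
          ((PySem.List.pyRange 0 8 1).map (fun c => pvF (PySem.Dict.mk rest) r c)).sum)).sum := by
        apply congrArg
        apply List.map_congr_left
        intro r hr
        apply congrArg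
        apply List.map_congr_left
        intro c hc
        exact hall r c hr hc
      rw [heq, ih hnd']
      have hc0 : pvContrib (r0, c0, t0) = 0 := by
        unfold pvContrib
        rw [if_neg hg]
      simp [hc0]

-- ===== VERDICT (by name: the statement is the Claim_ definition above) =====
theorem calcDiscs_spec : Claim_equal_calcDiscs := by
  intro board _ hpre
  unfold Spec_calcDiscs
  rw [B_eq_sum, A_eq_gridSum, gridSum_eq_contribSum]
  · rw [List.map_map]
    apply congrArg
    apply List.map_congr_left
    intro e _
    rfl
  · unfold Pre_calcDiscs at hpre
    simpa [List.map_map, Function.comp] using hpre
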